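-- pv_equiv track=rewrite | github.com/Thoufeek9495/RoyalWinAI_Kivy | ai_coach_app.py | decompose_dice_sum
-- ===== SOURCE A (Python) =====
-- def decompose_dice_sum(total):
--     results = []
--     for i in range(1, 7):
--         for j in range(1, 7):
--             for k in range(1, 7):
--                 if i + j + k == total:
--                     results.append((i, j, k))
--     return results
-- ===== SOURCE B (Python) =====
-- def decompose_dice_sum(total):
--     lo = max(1, total - 12)
--     hi = min(6, total - 2)
--     return [(i, j, total - i - j)
--             for i in range(lo, hi + 1)
--             for j in range(max(1, total - i - 6), min(6, total - i - 1) + 1)]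
-- ===== Notes on version B (the rewrite author's own statement) =====
-- stated objective: simpler
-- what changed: Instead of triple-nested filtering over every candidate triple, B computes the valid i-interval and, for each i, the valid j-interval in closed form and enumerates exactly the solutions (i, j, total-i-j) with no conditional at all.
import Mathlib
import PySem

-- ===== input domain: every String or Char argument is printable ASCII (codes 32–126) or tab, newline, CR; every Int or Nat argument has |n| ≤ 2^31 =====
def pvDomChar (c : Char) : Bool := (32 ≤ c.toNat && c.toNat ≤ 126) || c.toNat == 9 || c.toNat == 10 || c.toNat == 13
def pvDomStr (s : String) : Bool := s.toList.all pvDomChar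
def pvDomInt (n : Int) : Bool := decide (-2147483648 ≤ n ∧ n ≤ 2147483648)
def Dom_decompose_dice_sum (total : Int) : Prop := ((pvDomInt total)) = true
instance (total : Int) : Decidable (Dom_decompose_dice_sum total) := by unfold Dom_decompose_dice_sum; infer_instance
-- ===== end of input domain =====

-- B enumerates solutions directly from closed-form index intervals (no 216-candidate filtering); return value only.


-- ===== PORT A =====
def decompose_dice_sum (total : Int) : List (Int × Int × Int) :=
  (PySem.List.pyRange 1 7 1).foldl (fun acc i =>
    (PySem.List.pyRange 1 7 1).foldl (fun acc j =>
      (PySem.List.pyRange 1 7 1).foldl (fun acc k =>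
        if i + j + k = total then acc ++ [(i, j, k)] else acc) acc) acc) []

-- ===== PORT B =====
def decompose_dice_sum_alt (total : Int) : List (Int × Int × Int) :=
  (PySem.List.pyRange (max 1 (total - 12)) (min 6 (total - 2) + 1) 1).flatMap fun i =>
    (PySem.List.pyRange (max 1 (total - i - 6)) (min 6 (total - i - 1) + 1) 1).map fun j =>
      (i, j, total - i - j)

-- ===== PRECONDITION & SPEC =====
def Spec_decompose_dice_sum (total : Int) (out : List (Int × Int × Int)) : Prop := out = decompose_dice_sum_alt total
instance (total : Int) (out : List (Int × Int × Int)) : Decidable (Spec_decompose_dice_sum total out) := by unfold Spec_decompose_dice_sum; infer_instance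

-- ===== CLAIM =====
def Claim_equal_decompose_dice_sum : Prop := ∀ (total : Int), Dom_decompose_dice_sum total → Spec_decompose_dice_sum total (decompose_dice_sum total)

-- ===== LEMMAS AND PROOFS =====

-- A's inner k-loop collapses to a single conditional append of the unique candidate k = total - i - j.
theorem pv_inner (total i j : Int) (acc : List (Int × Int × Int)) :
    (PySem.List.pyRange 1 7 1).foldl (fun acc k =>
        if i + j + k = total then acc ++ [(i, j, k)] else acc) acc
      = (if 1 ≤ total - i - j ∧ total - i - j ≤ 6 then acc ++ [(i, j, total - i - j)] else acc) := by
  have h : PySem.List.pyRange 1 7 1 = [1, 2, 3, 4, 5, 6] := by decide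
  rw [h]
  simp only [List.foldl]
  split_ifs with h1 h2 h3 h4 h5 h6 h7 <;>
    first
      | rfl
      | (exfalso; omega)
      | (have hk : total - i - j = 1 ∨ total - i - j = 2 ∨ total - i - j = 3 ∨
            total - i - j = 4 ∨ total - i - j = 5 ∨ total - i - j = 6 := by omega
         rcases hk with hk | hk | hk | hk | hk | hk <;> rw [hk] <;> first | rfl | (exfalso; omega))

-- A fold that never changes its accumulator returns it unchanged.
theorem pv_keep {A : Type} (l : List Int) (g : A → Int → A) :
    ∀ acc : A, (∀ acc' x, x ∈ l → g acc' x = acc') → l.foldl g acc = acc := by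
  induction l with
  | nil => intro acc _; rfl
  | cons y ys ih =>
      intro acc h
      simp only [List.foldl]
      rw [h acc y (List.mem_cons_self)]
      exact ih acc (fun acc' x hx => h acc' x (List.mem_cons_of_mem y hx))

-- Outside 3 ≤ total ≤ 18 both programs return [].
theorem pv_empty (total : Int) (h : total < 3 ∨ 18 < total) :
    decompose_dice_sum total = decompose_dice_sum_alt total := by
  unfold decompose_dice_sum decompose_dice_sum_alt
  simp only [pv_inner]
  rw [pv_keep]
  · rw [PySem.List.pyRange_one]
    have hz : (min 6 (total - 2) + 1 - max 1 (total - 12)).toNat = 0 := by omega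
    rw [hz]; simp
  · intro acc i hi
    rw [PySem.List.mem_pyRange_one] at hi
    rw [pv_keep]
    intro acc' j hj
    rw [PySem.List.mem_pyRange_one] at hj
    rw [if_neg]
    omega

-- ===== VERDICT =====
set_option maxHeartbeats 1600000 in
set_option maxRecDepth 8000 in
theorem decompose_dice_sum_spec : Claim_equal_decompose_dice_sum := by
  intro total _
  unfold Spec_decompose_dice_sum
  by_cases hb : 3 ≤ total ∧ total ≤ 18
  · obtain ⟨h1, h2⟩ := hb
    interval_cases total <;> decide
  · exact pv_empty total (by omega)
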